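-- pv_equiv track=rewrite | github.com/MrBrantCode/unitest_baseline | mut_generate/mist_train_cf/cf_94829/solution.py | find_most_frequent_character
-- ===== SOURCE A (Python) =====
-- def find_most_frequent_character(strings):
--     vowels = ['a', 'e', 'i', 'o', 'u', 'A', 'E', 'I', 'O', 'U']
--     frequencies = {}
--
--     for string in strings:
--         string = string.replace(" ", "").lower()
--         for char in string:
--             if char in vowels:
--                 continue
--             if char not in frequencies:
--                 frequencies[char] = 1
--             else:
--                 frequencies[char] += 1
--
--     sorted_freq = sorted(frequencies.items(), key=lambda x: x[1], reverse=True)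
--
--     most_frequent_char = None
--     for char, freq in sorted_freq:
--         if char not in vowels:
--             most_frequent_char = char
--             break
--
--     return most_frequent_char
-- ===== SOURCE B (Python) =====
-- def find_most_frequent_character(strings):
--     vowels = ['a', 'e', 'i', 'o', 'u', 'A', 'E', 'I', 'O', 'U']
--     frequencies = {}
--
--     for string in strings:
--         string = string.replace(" ", "").lower()
--         for char in string:
--             if char in vowels:
--                 continue
--             frequencies[char] = frequencies.get(char, 0) + 1
--
--     if not frequencies:
--         return None
--
--     max_freq = max(frequencies.values())
--     for string in strings:
--         string = string.replace(" ", "").lower()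
--         for char in string:
--             if char in vowels:
--                 continue
--             if frequencies[char] == max_freq:
--                 return char
--     return None
-- ===== Notes on version B (the rewrite author's own statement) =====
-- stated objective: alternative
-- what changed: B replaces A's sort of the whole frequency table (then scan of the sorted list) by a single max over the counts plus a second pass over the raw strings that returns the first cleaned non-vowel character whose count equals that maximum; first-occurrence order reproduces A's stable-sort tie-break.
import Mathlib
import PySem

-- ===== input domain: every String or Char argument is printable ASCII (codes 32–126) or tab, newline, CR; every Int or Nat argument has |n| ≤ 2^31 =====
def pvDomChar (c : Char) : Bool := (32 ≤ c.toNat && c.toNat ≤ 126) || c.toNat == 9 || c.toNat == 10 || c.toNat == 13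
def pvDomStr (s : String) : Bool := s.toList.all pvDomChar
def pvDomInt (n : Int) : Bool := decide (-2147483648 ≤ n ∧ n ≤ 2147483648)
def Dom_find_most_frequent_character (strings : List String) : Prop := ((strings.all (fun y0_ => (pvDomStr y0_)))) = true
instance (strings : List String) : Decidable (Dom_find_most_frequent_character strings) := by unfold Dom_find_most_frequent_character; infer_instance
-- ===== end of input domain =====

-- B replaces A's sort of the frequency table by max-of-values plus a second pass
-- over the raw input (first-occurrence order reproduces the stable-sort tie-break);
-- objective: alternative decomposition without the sort.


-- ===== PORT A =====
def pvVowels : List Char := ['a', 'e', 'i', 'o', 'u', 'A', 'E', 'I', 'O', 'U']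

-- A's final loop: first entry of sorted_freq whose char is not a vowel (break)
def pvPickA : List (Char × Int) → Option Char
  | [] => none
  | (c, _) :: rest => if pvVowels.contains c then pvPickA rest else some c

def find_most_frequent_character (strings : List String) : Option String :=
  let frequencies := strings.foldl (fun freqs string =>
      (PySem.Str.lower (PySem.Str.replace string " " "")).toList.foldl
        (fun freqs char =>
          if pvVowels.contains char then freqs
          else if freqs.contains char = false then freqs.insert char 1
          else freqs.insert char (freqs.getD char 0 + 1))  -- frequencies[char] += 1 (key present)
        freqs)
    PySem.Dict.empty
  let sorted_freq := PySem.List.sorted frequencies.items (fun x => x.2) true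
  (pvPickA sorted_freq).map (fun c => String.ofList [c])

-- ===== PORT B =====
-- B's second pass, inner loop over one cleaned string: first non-vowel char with maximal count
def pvScanChars (freqs : PySem.Dict Char Int) (maxFreq : Int) : List Char → Option Char
  | [] => none
  | c :: rest =>
    if pvVowels.contains c then pvScanChars freqs maxFreq rest
    else if freqs.getD c 0 == maxFreq then some c    -- frequencies[char] (key always present)
    else pvScanChars freqs maxFreq rest

-- B's second pass, outer loop over the raw strings
def pvScanStrings (freqs : PySem.Dict Char Int) (maxFreq : Int) : List String → Option Char
  | [] => none
  | s :: rest =>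
    match pvScanChars freqs maxFreq (PySem.Str.lower (PySem.Str.replace s " " "")).toList with
    | some c => some c
    | none => pvScanStrings freqs maxFreq rest

def find_most_frequent_character_alt (strings : List String) : Option String :=
  let frequencies := strings.foldl (fun freqs string =>
      (PySem.Str.lower (PySem.Str.replace string " " "")).toList.foldl
        (fun freqs char =>
          if pvVowels.contains char then freqs
          else freqs.insert char (freqs.getD char 0 + 1))
        freqs)
    PySem.Dict.empty
  if frequencies.size = 0 then none
  else
    match PySem.List.max? frequencies.values (fun v => v) with
    | none => none   -- unreachable: values nonempty
    | some max_freq => (pvScanStrings frequencies max_freq strings).map (fun c => String.ofList [c])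

-- ===== PRECONDITION & SPEC =====
def Spec_find_most_frequent_character (strings : List String) (out : Option String) : Prop := out = find_most_frequent_character_alt strings
instance (strings : List String) (out : Option String) : Decidable (Spec_find_most_frequent_character strings out) := by unfold Spec_find_most_frequent_character; infer_instance

-- ===== CLAIM (what is proved, stated in full; the proofs are below) =====
def Claim_equal_find_most_frequent_character : Prop := ∀ (strings : List String), Dom_find_most_frequent_character strings → Spec_find_most_frequent_character strings (find_most_frequent_character strings)

-- ===== LEMMAS AND PROOFS =====

-- the cleaned character stream and its non-vowel part
def pvClean (s : String) : List Char :=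
  PySem.Chars.lower (PySem.Chars.replace s.toList [' '] [])

def pvL (strings : List String) : List Char :=
  ((strings.map pvClean).flatten).filter (fun c => !pvVowels.contains c)

theorem pv_toList_clean (s : String) :
    (PySem.Str.lower (PySem.Str.replace s " " "")).toList = pvClean s := by
  simp [pvClean, PySem.Str.toList_lower, PySem.Str.toList_replace]

-- both count loops build Counter(pvL strings)
theorem pv_dictA (strings : List String) :
    strings.foldl (fun freqs string =>
      (PySem.Str.lower (PySem.Str.replace string " " "")).toList.foldl
        (fun freqs char =>
          if pvVowels.contains char then freqs
          else if freqs.contains char = false then freqs.insert char 1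
          else freqs.insert char (freqs.getD char 0 + 1))
        freqs)
      PySem.Dict.empty = PySem.Dict.counter (pvL strings) := by
  simp only [pv_toList_clean]
  have hfun : (fun (freqs : PySem.Dict Char Int) (char : Char) =>
      if pvVowels.contains char then freqs
      else if freqs.contains char = false then freqs.insert char 1
      else freqs.insert char (freqs.getD char 0 + 1)) =
      (fun (freqs : PySem.Dict Char Int) (char : Char) =>
      if (!pvVowels.contains char) = true then freqs.insert char (freqs.getD char 0 + 1)
      else freqs) := by
    funext d c
    by_cases hv : c ∈ pvVowels
    · simp [hv]
    · by_cases hc : d.contains c = true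
      · simp [hv, hc]
      · have h0 : d.getD c 0 = 0 := PySem.Dict.getD_of_not_contains d (k := c) 0 (by simpa using hc)
        simp [hv, hc, h0]
  rw [hfun,
    ← List.foldl_map (f := pvClean)
      (g := fun (d : PySem.Dict Char Int) (cs : List Char) =>
        cs.foldl (fun freqs char =>
          if (!pvVowels.contains char) = true then freqs.insert char (freqs.getD char 0 + 1)
          else freqs) d),
    ← List.foldl_flatten, PySem.List.foldl_if_eq_foldl_filter,
    PySem.Dict.foldl_insert_getD_add_one_eq_counter]
  rfl

theorem pv_dictB (strings : List String) :
    strings.foldl (fun freqs string =>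
      (PySem.Str.lower (PySem.Str.replace string " " "")).toList.foldl
        (fun freqs char =>
          if pvVowels.contains char then freqs
          else freqs.insert char (freqs.getD char 0 + 1))
        freqs)
      PySem.Dict.empty = PySem.Dict.counter (pvL strings) := by
  simp only [pv_toList_clean]
  have hfun : (fun (freqs : PySem.Dict Char Int) (char : Char) =>
      if pvVowels.contains char then freqs
      else freqs.insert char (freqs.getD char 0 + 1)) =
      (fun (freqs : PySem.Dict Char Int) (char : Char) =>
      if (!pvVowels.contains char) = true then freqs.insert char (freqs.getD char 0 + 1)
      else freqs) := by
    funext d c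
    by_cases hv : c ∈ pvVowels
    · simp [hv]
    · simp [hv]
  rw [hfun,
    ← List.foldl_map (f := pvClean)
      (g := fun (d : PySem.Dict Char Int) (cs : List Char) =>
        cs.foldl (fun freqs char =>
          if (!pvVowels.contains char) = true then freqs.insert char (freqs.getD char 0 + 1)
          else freqs) d),
    ← List.foldl_flatten, PySem.List.foldl_if_eq_foldl_filter,
    PySem.Dict.foldl_insert_getD_add_one_eq_counter]
  rfl

-- head of a stable reverse sort is the FIRST element attaining the maximal key
theorem pv_head_sorted_rev_find {α κ : Type} [LinearOrder κ] (key : α → κ) :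
    ∀ (xs : List α) (m : α) (t : List α),
      PySem.List.sorted xs key true = m :: t →
      xs.find? (fun x => decide (key m ≤ key x)) = some m := by
  intro xs
  induction xs using List.reverseRecOn with
  | nil => intro m t h; simp [PySem.List.sorted] at h
  | append_singleton ys x ih =>
    intro m t h
    rw [PySem.List.sorted_rev_eq_foldl_insertBy, List.foldl_append, List.foldl_cons,
      List.foldl_nil, ← PySem.List.sorted_rev_eq_foldl_insertBy] at h
    cases hs : PySem.List.sorted ys key true with
    | nil =>
      rw [hs] at h
      simp only [PySem.List.insertBy] at h
      obtain ⟨rfl, rfl⟩ := List.cons.inj h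
      have hys : ys = [] := (PySem.List.sorted_eq_nil_iff ys key true).mp hs
      subst hys
      simp
    | cons m' t' =>
      rw [hs] at h
      by_cases hlt : key m' < key x
      · have hins : PySem.List.insertBy (fun a b => decide (key b < key a)) x (m' :: t')
            = x :: m' :: t' := by simp [PySem.List.insertBy, hlt]
        rw [hins] at h
        obtain ⟨rfl, rfl⟩ := List.cons.inj h
        rw [List.find?_append,
          List.find?_eq_none.mpr (fun y hy => by
            have hle := PySem.List.key_head_sorted_rev_ge ys key hs y hy
            simp only [decide_eq_true_eq]
            exact not_le.mpr (lt_of_le_of_lt hle hlt))]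
        simp
      · have hins : PySem.List.insertBy (fun a b => decide (key b < key a)) x (m' :: t')
            = m' :: PySem.List.insertBy (fun a b => decide (key b < key a)) x t' := by
          simp [PySem.List.insertBy, hlt]
        rw [hins] at h
        obtain ⟨rfl, rfl⟩ := List.cons.inj h
        rw [List.find?_append, ih m' t' hs]
        rfl

-- find? over a growing Set-fold (helper for pv_find?_ofList)
theorem pv_foldl_add_prefix {α : Type} [BEq α] [LawfulBEq α] :
    ∀ (l : List α) (s : PySem.Set α), ∃ t, l.foldl PySem.Set.add s = s ++ t := by
  intro l
  induction l with
  | nil => exact fun s => ⟨[], by simp⟩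
  | cons c l ih =>
    intro s
    by_cases hc : c ∈ s
    · obtain ⟨t, ht⟩ := ih s
      have ha : PySem.Set.add s c = s := by simp [PySem.Set.add, hc]
      exact ⟨t, by simp [ha, ht]⟩
    · obtain ⟨t, ht⟩ := ih (s ++ [c])
      have ha : PySem.Set.add s c = s ++ [c] := by simp [PySem.Set.add, hc]
      exact ⟨c :: t, by simp [ha, ht]⟩

theorem pv_find?_foldl_add {α : Type} [BEq α] [LawfulBEq α] :
    ∀ (l : List α) (s : PySem.Set α) (p : α → Bool),
      (∀ x ∈ s, p x = false) → (l.foldl PySem.Set.add s).find? p = l.find? p := by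
  intro l
  induction l with
  | nil =>
    intro s p h
    simp only [List.foldl_nil, List.find?_nil]
    exact List.find?_eq_none.mpr (fun x hx => by simp [h x hx])
  | cons c l ih =>
    intro s p h
    by_cases hp : p c = true
    · have hc : ¬ c ∈ s := fun hc => by simp [h c hc] at hp
      have ha : PySem.Set.add s c = s ++ [c] := by simp [PySem.Set.add, hc]
      obtain ⟨t, ht⟩ := pv_foldl_add_prefix l (s ++ [c])
      simp only [List.foldl_cons, ha, ht]
      rw [List.append_assoc, List.find?_append,
        List.find?_eq_none.mpr (fun x hx => by simp [h x hx])]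
      simp [hp]
    · have h' : ∀ x ∈ PySem.Set.add s c, p x = false := by
        intro x hx
        rcases (PySem.Set.mem_add s c x).mp hx with hx' | hx'
        · exact h x hx'
        · subst hx'; simpa using hp
      simp only [List.foldl_cons]
      rw [ih (PySem.Set.add s c) p h']
      simp [hp]

-- dedup keeps first occurrences, so find? is unchanged
theorem pv_find?_ofList {α : Type} [BEq α] [LawfulBEq α] (l : List α) (p : α → Bool) :
    (PySem.Set.ofList l).find? p = l.find? p := by
  rw [PySem.Set.ofList_eq_foldl]
  exact pv_find?_foldl_add l [] p (by simp)

theorem pv_find?_congr {α : Type} (p q : α → Bool) :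
    ∀ l : List α, (∀ x ∈ l, p x = q x) → l.find? p = l.find? q := by
  intro l h
  induction l with
  | nil => rfl
  | cons c l ih =>
    have hc := h c (by simp)
    simp only [List.find?_cons, hc]
    cases hq : q c with
    | true => rfl
    | false => exact ih (fun x hx => h x (by simp [hx]))

-- B's scan equals find? over the filtered cleaned stream
theorem pv_scanChars_eq (d : PySem.Dict Char Int) (m : Int) (cs : List Char) :
    pvScanChars d m cs =
      (cs.filter (fun c => !pvVowels.contains c)).find? (fun c => d.getD c 0 == m) := by
  induction cs with
  | nil => rfl
  | cons c rest ih =>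
    by_cases hv : c ∈ pvVowels
    · simp [pvScanChars, hv, ih]
    · by_cases hm : d.getD c 0 = m
      · simp [pvScanChars, hv, hm]
      · simp [pvScanChars, hv, hm, ih]

theorem pv_scanStrings_eq (d : PySem.Dict Char Int) (m : Int) (ss : List String) :
    pvScanStrings d m ss =
      (((ss.map pvClean).flatten).filter (fun c => !pvVowels.contains c)).find?
        (fun c => d.getD c 0 == m) := by
  induction ss with
  | nil => rfl
  | cons s rest ih =>
    simp only [pvScanStrings, pv_toList_clean, pv_scanChars_eq, List.map_cons,
      List.flatten_cons, List.filter_append, List.find?_append, ih]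
    cases h : (List.filter (fun c => !pvVowels.contains c) (pvClean s)).find?
        (fun c => d.getD c 0 == m) with
    | none => simp
    | some c => simp

-- ===== VERDICT (by name: the statement is the Claim_ definition above) =====
theorem find_most_frequent_character_spec : Claim_equal_find_most_frequent_character := by
  unfold Claim_equal_find_most_frequent_character
  intro strings _
  unfold Spec_find_most_frequent_character
  unfold find_most_frequent_character find_most_frequent_character_alt
  rw [pv_dictA strings, pv_dictB strings]
  dsimp only
  by_cases hnil : pvL strings = []
  · rw [hnil]; rfl
  · obtain ⟨c0, hc0⟩ := List.exists_mem_of_ne_nil _ hnil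
    have hitems : (PySem.Dict.counter (pvL strings)).items
        = (PySem.Set.ofList (pvL strings)).map
            (fun k => (k, ((pvL strings).count k : Int))) := PySem.Dict.items_counter _
    have hSne : PySem.Set.ofList (pvL strings) ≠ [] := by
      intro hS
      have := (PySem.Set.mem_ofList (pvL strings) c0).mpr hc0
      rw [hS] at this; exact absurd this (List.not_mem_nil)
    have hine : (PySem.Dict.counter (pvL strings)).items ≠ [] := by
      rw [hitems]; simpa using hSne
    -- the sorted list is nonempty: name its head
    cases hs : PySem.List.sorted (PySem.Dict.counter (pvL strings)).items (fun x => x.2) true with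
    | nil => exact absurd ((PySem.List.sorted_eq_nil_iff _ _ _).mp hs) hine
    | cons m t =>
      -- B's branch: the dict is nonempty
      have hsz : ¬ (PySem.Dict.counter (pvL strings)).size = 0 := by
        simpa [PySem.Dict.size, List.length_eq_zero_iff] using hine
      -- max? of the values succeeds
      have hvne : (PySem.Dict.counter (pvL strings)).values ≠ [] := by
        simpa [PySem.Dict.values] using hine
      cases hM : PySem.List.max? (PySem.Dict.counter (pvL strings)).values (fun v => v) with
      | none => exact absurd ((PySem.List.max?_eq_none_iff _ _).mp hM) hvne
      | some M =>
        -- m is a member of items, and its count is maximal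
        have hmem : m ∈ (PySem.Dict.counter (pvL strings)).items := by
          have : m ∈ PySem.List.sorted (PySem.Dict.counter (pvL strings)).items
              (fun x => x.2) true := by rw [hs]; exact List.mem_cons_self
          exact (PySem.List.mem_sorted _ _ _ _).mp this
        have hall : ∀ y ∈ (PySem.Dict.counter (pvL strings)).items, y.2 ≤ m.2 :=
          PySem.List.key_head_sorted_rev_ge _ _ hs
        -- M = m.2
        have hMeq : M = m.2 := by
          have h1 : m.2 ≤ M := PySem.List.max?_isMax hM m.2
            (by simp only [PySem.Dict.values]; exact List.mem_map_of_mem hmem)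
          have h2 : M ≤ m.2 := by
            have := PySem.List.max?_mem hM
            simp only [PySem.Dict.values, List.mem_map] at this
            obtain ⟨y, hy, hyM⟩ := this
            rw [← hyM]; exact hall y hy
          exact le_antisymm h2 h1
        -- A's head is the first maximal entry of items …
        have hfind := pv_head_sorted_rev_find (fun x : Char × Int => x.2) _ m t hs
        rw [hitems, List.find?_map] at hfind
        obtain ⟨k, hk, hkm⟩ := (Option.map_eq_some_iff).mp hfind
        -- … whose key is the first char of the stream with maximal count
        have hkey : k = m.1 := by
          have := congrArg Prod.fst hkm; simpa using this
        have hcongr : ∀ x ∈ PySem.Set.ofList (pvL strings),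
            ((fun x => decide (m.2 ≤ x.2)) ∘ fun k => (k, ((pvL strings).count k : Int))) x
              = (fun c => ((pvL strings).count c : Int) == m.2) x := by
          intro x hx
          have hxle : ((pvL strings).count x : Int) ≤ m.2 := by
            have : (x, ((pvL strings).count x : Int))
                ∈ (PySem.Dict.counter (pvL strings)).items := by
              rw [hitems]; exact List.mem_map_of_mem hx
            exact hall _ this
          by_cases hx2 : ((pvL strings).count x : Int) = m.2
          · simp [hx2]
          · simp only [Function.comp_apply]
            rw [decide_eq_false (by exact fun hle => hx2 (le_antisymm hxle hle)),
              beq_eq_false_iff_ne.mpr hx2]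
        have hfirst : (pvL strings).find? (fun c => ((pvL strings).count c : Int) == m.2)
            = some k := by
          rw [← pv_find?_ofList, ← pv_find?_congr _ _ _ hcongr]; exact hk
        -- B's scan returns k
        have hscan : pvScanStrings (PySem.Dict.counter (pvL strings)) M strings = some k := by
          rw [pv_scanStrings_eq]
          have hLdef : (((strings.map pvClean).flatten).filter (fun c => !pvVowels.contains c))
              = pvL strings := rfl
          rw [hLdef, hMeq]
          rw [show (fun c => (PySem.Dict.counter (pvL strings)).getD c 0 == m.2)
              = (fun c => ((pvL strings).count c : Int) == m.2) from
            funext fun c => by rw [PySem.Dict.getD_counter]]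
          exact hfirst
        -- A's pick returns m.1 = k
        have hnv : pvVowels.contains m.1 = false := by
          have hkL : k ∈ pvL strings :=
            (PySem.Set.mem_ofList _ _).mp (List.mem_of_find?_eq_some hk)
          unfold pvL at hkL
          have := List.of_mem_filter hkL
          rw [← hkey]
          simpa using this
        rw [if_neg hsz]
        dsimp only
        rw [hscan]
        have hnv' : ¬ m.1 ∈ pvVowels := by simpa using hnv
        simp [pvPickA, hnv', hkey]
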